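-- pv_equiv track=rewrite | github.com/Kd3Us/Sentiment_analisys_multilingue | app/core/data_processor.py | _universal_tokenize
-- ===== SOURCE A (Python) =====
-- from typing import List, Dict, Tuple, Optional, Set
--
-- def _universal_tokenize(text: str) -> List[str]:
--     """Tokenisation universelle basée sur les propriétés Unicode"""
--     import unicodedata
--
--     # Normaliser le texte (décomposer les accents, etc.)
--     normalized = unicodedata.normalize('NFD', text.lower())
--
--     # Tokenisation basée sur les espaces et la ponctuation Unicode
--     tokens = []
--     current_token = ""
--
--     for char in normalized:
--         if char.isalnum() or char in "'-":  # Lettres, chiffres, apostrophes, tirets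
--             current_token += char
--         else:
--             if current_token:
--                 tokens.append(current_token)
--                 current_token = ""
--
--     # Ajouter le dernier token
--     if current_token:
--         tokens.append(current_token)
--
--     return tokens
-- ===== SOURCE B (Python) =====
-- from typing import List
-- from itertools import groupby
-- import unicodedata
--
-- def _universal_tokenize(text: str) -> List[str]:
--     normalized = unicodedata.normalize('NFD', text.lower())
--     return ["".join(g) for k, g in groupby(normalized, key=lambda c: c.isalnum() or c in "'-") if k]
-- ===== Notes on version B (the rewrite author's own statement) =====
-- stated objective: idiomatic
-- what changed: Replaces the explicit character-accumulator loop with itertools.groupby on the token/separator predicate, joining and keeping only the token groups (ported as maximal-run span recursion instead of a fold over (tokens, current) state).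
import Mathlib
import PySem

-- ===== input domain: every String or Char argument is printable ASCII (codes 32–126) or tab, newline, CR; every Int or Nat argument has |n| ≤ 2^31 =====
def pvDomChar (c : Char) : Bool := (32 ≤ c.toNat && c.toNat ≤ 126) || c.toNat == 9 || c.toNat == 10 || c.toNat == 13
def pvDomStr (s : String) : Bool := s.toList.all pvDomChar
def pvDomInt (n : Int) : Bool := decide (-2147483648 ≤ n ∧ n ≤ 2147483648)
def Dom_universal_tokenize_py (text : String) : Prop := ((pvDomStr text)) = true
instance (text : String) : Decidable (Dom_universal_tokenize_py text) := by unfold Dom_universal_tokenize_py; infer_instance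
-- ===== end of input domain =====

-- B replaces A's explicit (tokens, current_token) accumulator loop by a groupby-style
-- span recursion over maximal token-character runs; objective: idiomatic, same cost.
-- On the ASCII domain Dom_, unicodedata.normalize('NFD', ·) is the identity, so both
-- ports apply only Python's str.lower (PySem.Str.lower) before tokenizing.


-- char is a token character: isalnum() or in "'-"
def pvTokChar (c : Char) : Bool := PySem.Chars.isalnum c || c == '\'' || c == '-'

-- ===== PORT A =====
-- A's loop: fold over the normalized characters carrying (tokens, current_token);
-- afterwards the pending current_token is appended if nonempty.
def universal_tokenize_py (text : String) : List String :=
  -- NFD is the identity on the ASCII domain, so normalized = text.lower()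
  let normalized := PySem.Str.lower text
  let st := normalized.toList.foldl
    (fun (st : List String × List Char) c =>
      if pvTokChar c then (st.1, st.2 ++ [c])
      else if st.2 ≠ [] then (st.1 ++ [String.ofList st.2], []) else (st.1, []))
    ([], [])
  if st.2 ≠ [] then st.1 ++ [String.ofList st.2] else st.1

-- ===== PORT B =====
-- B's groupby: maximal runs of equal key; keep (join) only the key=True runs.
def pvGroups : List Char → List String
  | [] => []
  | c :: cs =>
    if pvTokChar c then
      String.ofList (c :: cs.takeWhile pvTokChar) :: pvGroups (cs.dropWhile pvTokChar)
    else
      pvGroups cs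
termination_by l => l.length
decreasing_by
  · simpa using Nat.lt_succ_of_le (List.length_dropWhile_le _ _)
  · simp

def universal_tokenize_py_alt (text : String) : List String :=
  pvGroups (PySem.Str.lower text).toList

-- ===== PRECONDITION & SPEC =====
def Spec_universal_tokenize_py (text : String) (out : List String) : Prop := out = universal_tokenize_py_alt text
instance (text : String) (out : List String) : Decidable (Spec_universal_tokenize_py text out) := by unfold Spec_universal_tokenize_py; infer_instance

-- ===== CLAIM (what is proved, stated in full; the proofs are below) =====
def Claim_equal_universal_tokenize_py : Prop := ∀ (text : String), Dom_universal_tokenize_py text → Spec_universal_tokenize_py text (universal_tokenize_py text)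

-- ===== LEMMAS AND PROOFS =====

-- A's loop body
def pvStep (st : List String × List Char) (c : Char) : List String × List Char :=
  if pvTokChar c then (st.1, st.2 ++ [c])
  else if st.2 ≠ [] then (st.1 ++ [String.ofList st.2], []) else (st.1, [])

def pvFin (st : List String × List Char) : List String :=
  if st.2 ≠ [] then st.1 ++ [String.ofList st.2] else st.1

lemma pvStep_tok (st : List String × List Char) (c : Char) (h : pvTokChar c = true) :
    pvStep st c = (st.1, st.2 ++ [c]) := by simp [pvStep, h]

lemma pvStep_sep_pending (st : List String × List Char) (c : Char) (h : pvTokChar c = false)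
    (h2 : st.2 ≠ []) : pvStep st c = (st.1 ++ [String.ofList st.2], []) := by
  simp [pvStep, h, h2]

lemma pvStep_sep_empty (st : List String × List Char) (c : Char) (h : pvTokChar c = false)
    (h2 : st.2 = []) : pvStep st c = (st.1, []) := by simp [pvStep, h, h2]

-- the accumulated token list factors out of A's loop
lemma pvFold_acc (l : List Char) : ∀ (toks : List String) (cur : List Char),
    pvFin (l.foldl pvStep (toks, cur)) = toks ++ pvFin (l.foldl pvStep ([], cur)) := by
  induction l with
  | nil => intro toks cur; by_cases h : cur = [] <;> simp [pvFin, h]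
  | cons c cs ih =>
    intro toks cur
    rcases h : pvTokChar c with _ | _
    · by_cases h2 : cur = []
      · rw [List.foldl_cons, List.foldl_cons, pvStep_sep_empty _ _ h h2,
            pvStep_sep_empty _ _ h h2, ih]
      · rw [List.foldl_cons, List.foldl_cons, pvStep_sep_pending _ _ h h2,
            pvStep_sep_pending _ _ h h2]
        dsimp only
        rw [ih]
        simp only [List.nil_append]
        rw [ih ([String.ofList cur]) []]
        simp
    · rw [List.foldl_cons, List.foldl_cons, pvStep_tok _ _ h, pvStep_tok _ _ h, ih]

-- A's loop computes pvGroups (joint statement: empty and nonempty pending token)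
lemma pvLoop_groups (l : List Char) :
    pvFin (l.foldl pvStep ([], [])) = pvGroups l ∧
    ∀ cur, cur ≠ [] → pvFin (l.foldl pvStep ([], cur)) =
      String.ofList (cur ++ l.takeWhile pvTokChar) :: pvGroups (l.dropWhile pvTokChar) := by
  induction l with
  | nil =>
    refine ⟨by simp [pvFin, pvGroups], fun cur h => ?_⟩
    simp [pvFin, pvGroups, h]
  | cons c cs ih =>
    rcases h : pvTokChar c with _ | _
    · refine ⟨?_, fun cur hcur => ?_⟩
      · rw [List.foldl_cons, pvStep_sep_empty _ _ h rfl]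
        rw [show pvGroups (c :: cs) = pvGroups cs by simp [pvGroups, h]]
        exact ih.1
      · rw [List.foldl_cons, pvStep_sep_pending _ _ h hcur, pvFold_acc, ih.1]
        simp [h, pvGroups]
    · refine ⟨?_, fun cur hcur => ?_⟩
      · rw [List.foldl_cons, pvStep_tok _ _ h]
        have := (ih.2 [c] (by simp))
        simp only [List.nil_append] at this ⊢
        rw [this]
        simp [pvGroups, h]
      · rw [List.foldl_cons, pvStep_tok _ _ h]
        rw [ih.2 (cur ++ [c]) (by simp)]
        simp [h]

-- ===== VERDICT (by name: the statement is the Claim_ definition above) =====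
theorem universal_tokenize_py_spec : Claim_equal_universal_tokenize_py := by
  intro text _
  show _ = _
  unfold universal_tokenize_py universal_tokenize_py_alt
  exact (pvLoop_groups _).1
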